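-- pv_equiv track=rewrite | github.com/Loriendil/From-DNA-to_Child | Validations/rna_validator.py | pas_hits
-- ===== SOURCE A (Python) =====
-- def pas_hits(s, cleavage_idx, window=(10,30)):
--     motifs = {"AAUAAA","AUUAAA","AGUAAA","AAUAUA","AAUACA","AAUAAG"}
--     start = max(0, cleavage_idx - window[1] - 6)
--     end = max(0, cleavage_idx - window[0])
--     hits = []
--     region = s[start:end]
--     for i in range(len(region)-5):
--         kmer = region[i:i+6]
--         if kmer in motifs:
--             hits.append((start+i, kmer, cleavage_idx - (start+i)))
--     return hits
-- ===== SOURCE B (Python) =====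
-- def pas_hits(s, cleavage_idx, window=(10, 30)):
--     # Per-motif substring search (find with advancing start) + sort, instead of per-position k-mer membership scan.
--     motifs = ["AAUAAA", "AUUAAA", "AGUAAA", "AAUAUA", "AAUACA", "AAUAAG"]
--     start = max(0, cleavage_idx - window[1] - 6)
--     end = max(0, cleavage_idx - window[0])
--     region = s[start:end]
--     hits = []
--     for m in motifs:
--         pos = region.find(m)
--         while pos != -1:
--             hits.append((start + pos, m, cleavage_idx - (start + pos)))
--             pos = region.find(m, pos + 1)
--     hits.sort(key=lambda h: h[0])
--     return hits
-- ===== Notes on version B (the rewrite author's own statement) =====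
-- stated objective: alternative
-- what changed: Replaces the per-position k-mer extraction + set-membership scan by a per-motif str.find loop (advancing the start index by 1 to keep overlapping hits) followed by a sort on the hit start index; positions are unique so the sort reproduces A's ascending order exactly.
import Mathlib
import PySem

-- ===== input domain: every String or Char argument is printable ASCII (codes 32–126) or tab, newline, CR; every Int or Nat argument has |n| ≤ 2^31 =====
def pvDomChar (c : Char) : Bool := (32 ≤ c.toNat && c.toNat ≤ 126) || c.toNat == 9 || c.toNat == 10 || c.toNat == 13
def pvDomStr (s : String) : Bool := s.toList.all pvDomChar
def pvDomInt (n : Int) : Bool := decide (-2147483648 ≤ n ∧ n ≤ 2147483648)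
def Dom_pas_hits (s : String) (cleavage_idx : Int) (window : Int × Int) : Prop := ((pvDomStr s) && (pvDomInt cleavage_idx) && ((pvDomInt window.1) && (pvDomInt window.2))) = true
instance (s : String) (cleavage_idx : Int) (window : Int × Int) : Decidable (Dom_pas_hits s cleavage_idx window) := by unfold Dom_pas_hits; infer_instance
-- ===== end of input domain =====

-- B replaces A's per-position k-mer membership scan by a per-motif find-loop plus a sort on start index (alternative algorithm, same exact result).


-- ===== PORT A =====
def pas_hits (s : String) (cleavage_idx : Int) (window : Int × Int) : List (Int × String × Int) :=
  let motifs : PySem.Set String :=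
    PySem.Set.ofList ["AAUAAA", "AUUAAA", "AGUAAA", "AAUAUA", "AAUACA", "AAUAAG"]
  let start := max 0 (cleavage_idx - window.2 - 6)
  let stop := max 0 (cleavage_idx - window.1)
  let region := PySem.Str.slice s (some start) (some stop)
  (PySem.List.pyRange 0 (PySem.Str.len region - 5) 1).foldl
    (fun hits i =>
      let kmer := PySem.Str.slice region (some i) (some (i + 6))
      if PySem.Set.contains motifs kmer then
        hits ++ [(start + i, kmer, cleavage_idx - (start + i))]
      else hits) []

-- ===== PORT B =====
-- the 'while pos != -1' loop of Source B; fuel = region length + 1 always suffices (each step advances pos)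
def pasFindAll (region m : String) : Nat → Nat → List Int
  | 0, _ => []
  | fuel + 1, pos =>
    let f := PySem.Str.findFrom region m (pos : Int)
    if f = -1 then [] else f :: pasFindAll region m fuel (f.toNat + 1)

def pas_hits_alt (s : String) (cleavage_idx : Int) (window : Int × Int) : List (Int × String × Int) :=
  let motifs : List String := ["AAUAAA", "AUUAAA", "AGUAAA", "AAUAUA", "AAUACA", "AAUAAG"]
  let start := max 0 (cleavage_idx - window.2 - 6)
  let stop := max 0 (cleavage_idx - window.1)
  let region := PySem.Str.slice s (some start) (some stop)
  let hits := motifs.foldl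
    (fun acc m =>
      acc ++ (pasFindAll region m ((PySem.Str.len region).toNat + 1) 0).map
        (fun f => (start + f, m, cleavage_idx - (start + f)))) []
  PySem.List.sorted hits (fun h => h.1)

-- ===== PRECONDITION & SPEC =====
def Spec_pas_hits (s : String) (cleavage_idx : Int) (window : Int × Int) (out : List (Int × String × Int)) : Prop := out = pas_hits_alt s cleavage_idx window
instance (s : String) (cleavage_idx : Int) (window : Int × Int) (out : List (Int × String × Int)) : Decidable (Spec_pas_hits s cleavage_idx window out) := by unfold Spec_pas_hits; infer_instance

-- ===== CLAIM (what is proved, stated in full; the proofs are below) =====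
def Claim_equal_pas_hits : Prop := ∀ (s : String) (cleavage_idx : Int) (window : Int × Int), Dom_pas_hits s cleavage_idx window → Spec_pas_hits s cleavage_idx window (pas_hits s cleavage_idx window)

-- ===== LEMMAS AND PROOFS =====

-- occurrence positions of mL in r at or after pos (ascending)
def pasOccs (r mL : List Char) (pos : Nat) : List Nat :=
  (List.range' pos (r.length - pos)).filter (fun k => decide (mL <+: r.drop k))

def pasMotifStrs : List String := ["AAUAAA", "AUUAAA", "AGUAAA", "AAUAUA", "AAUACA", "AAUAAG"]

def pasKmer (region : String) (k : Nat) : String :=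
  PySem.Str.slice region (some (k : Int)) (some ((k : Int) + 6))

theorem pasKmer_toList (region : String) (k : Nat) :
    (pasKmer region k).toList = (region.toList.drop k).take 6 := by
  unfold pasKmer
  rw [PySem.Str.toList_slice]
  rw [show ((k : Int) + 6) = ((k : Int) + ((6:Nat) : Int)) by norm_num,
    PySem.Chars.slice_eq_listSlice, PySem.List.slice_natCast_add]

theorem pas_infix_of_prefix_ge {r mL : List Char} {pos k : Nat}
    (h : mL <+: r.drop k) (hk : pos ≤ k) : mL <:+: r.drop pos := by
  have h2 : r.drop k = (r.drop pos).drop (k - pos) := by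
    rw [List.drop_drop]; congr 1; omega
  rw [h2] at h
  exact h.isInfix.trans ((r.drop pos).drop_suffix (k-pos)).isInfix

theorem pasOccs_nil {r mL : List Char} {pos : Nat}
    (h : ∀ k, pos ≤ k → ¬ mL <+: r.drop k) : pasOccs r mL pos = [] := by
  unfold pasOccs
  rw [List.filter_eq_nil_iff]
  intro k hk
  have := (List.mem_range'_1.mp hk).1
  simp only [decide_eq_true_eq]
  exact fun hc => h k this hc

theorem pasOccs_cons {r mL : List Char} {pos j : Nat}
    (hpos : pos ≤ j) (hj : j < r.length) (hmatch : mL <+: r.drop j)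
    (hmin : ∀ k, pos ≤ k → k < j → ¬ mL <+: r.drop k) :
    pasOccs r mL pos = j :: pasOccs r mL (j + 1) := by
  unfold pasOccs
  have hsplit : List.range' pos (r.length - pos) =
      List.range' pos (j - pos) ++ List.range' j (r.length - j) := by
    have := @List.range'_append pos (j - pos) (r.length - j) 1
    simp only [Nat.one_mul] at this
    rw [show pos + (j - pos) = j by omega] at this
    rw [this]; congr 1; omega
  rw [hsplit, List.filter_append]
  have h1 : (List.range' pos (j - pos)).filter (fun k => decide (mL <+: r.drop k)) = [] := by
    rw [List.filter_eq_nil_iff]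
    intro k hk
    have hm := List.mem_range'_1.mp hk
    simp only [decide_eq_true_eq]
    exact fun hc => hmin k hm.1 (by omega) hc
  rw [h1, List.nil_append]
  have h2 : r.length - j = (r.length - (j+1)) + 1 := by omega
  rw [h2, List.range'_succ, List.filter_cons]
  simp [hmatch]

theorem pasFindAll_eq (region m : String) (hm : m.toList ≠ []) :
    ∀ (fuel pos : Nat), pos ≤ region.toList.length → region.toList.length - pos < fuel →
    pasFindAll region m fuel pos = List.map (fun k : Nat => (k : Int)) (pasOccs region.toList m.toList pos) := by
  intro fuel
  induction fuel with
  | zero => intro pos _ h; omega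
  | succ fuel ih =>
    intro pos hpos hfuel
    show (let f := PySem.Str.findFrom region m (pos : Int);
      if f = -1 then [] else f :: pasFindAll region m fuel (f.toNat + 1))
      = _
    simp only [PySem.Str.findFrom_eq]
    set f := PySem.Chars.findFrom region.toList m.toList (pos : Int) with hfdef
    by_cases hf : f = -1
    · rw [if_pos hf]
      have hno : ¬ m.toList <:+: region.toList.drop pos :=
        (PySem.Chars.findFrom_natCast_eq_neg_one_iff region.toList m.toList pos hpos).mp hf
      rw [pasOccs_nil (fun k hk hc => hno (pas_infix_of_prefix_ge hc hk))]
      simp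
    · rw [if_neg hf]
      obtain ⟨hge, hmatch, hmin⟩ :=
        PySem.Chars.findFrom_natCast_spec region.toList m.toList pos hpos hf
      have hf0 : 0 ≤ f := le_trans (by exact_mod_cast Nat.zero_le pos) hge
      have hfj : f = (f.toNat : Int) := (Int.toNat_of_nonneg hf0).symm
      have hposj : pos ≤ f.toNat := by omega
      have hj : f.toNat < region.toList.length := by
        have h1 : m.toList.length ≤ (region.toList.drop f.toNat).length := hmatch.length_le
        rw [List.length_drop] at h1
        have h2 : 0 < m.toList.length := List.length_pos_iff.mpr hm
        omega
      rw [pasOccs_cons hposj hj hmatch hmin, List.map_cons, ← hfj,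
        ih (f.toNat + 1) (by omega) (by omega)]

theorem pasOccs_zero_mem {r mL : List Char} {k : Nat} :
    k ∈ pasOccs r mL 0 ↔ k < r.length ∧ mL <+: r.drop k := by
  unfold pasOccs
  simp [List.mem_filter, List.mem_range'_1]

theorem pasMotif_len : ∀ m ∈ pasMotifStrs, m.toList.length = 6 := by decide

theorem pasKmer_motif_iff (region m : String) (hm6 : m.toList.length = 6) (k : Nat) :
    (k < region.toList.length - 5 ∧ pasKmer region k = m) ↔ k ∈ pasOccs region.toList m.toList 0 := by
  rw [pasOccs_zero_mem]
  constructor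
  · rintro ⟨hk, hkm⟩
    refine ⟨by omega, ?_⟩
    rw [← hkm, pasKmer_toList]
    exact List.take_prefix 6 _
  · rintro ⟨hk, hpre⟩
    have hlen := hpre.length_le
    rw [List.length_drop, hm6] at hlen
    refine ⟨by omega, ?_⟩
    apply String.toList_inj.mp
    rw [pasKmer_toList]
    rw [List.prefix_iff_eq_take, hm6] at hpre
    exact hpre.symm

theorem pas_hits_spec_core (region : String) (st c : Int) :
    ((PySem.List.pyRange 0 (PySem.Str.len region - 5) 1).foldl
      (fun hits i =>
        let kmer := PySem.Str.slice region (some i) (some (i + 6))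
        if PySem.Set.contains (PySem.Set.ofList pasMotifStrs) kmer then
          hits ++ [(st + i, kmer, c - (st + i))]
        else hits) [])
    = PySem.List.sorted
        (pasMotifStrs.foldl
          (fun acc m =>
            acc ++ (pasFindAll region m ((PySem.Str.len region).toNat + 1) 0).map
              (fun f => (st + f, m, c - (st + f)))) [])
        (fun h => h.1) := by
  have hlen : PySem.Str.len region = (region.toList.length : Int) := by rw [PySem.Str.len_eq]
  -- ===== A side =====
  rw [hlen, PySem.List.pyRange_one,
    show (((region.toList.length : Int) - 5) - 0).toNat = region.toList.length - 5 by omega, List.foldl_map]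
  simp only [zero_add]
  simp only [show ∀ k : Nat, PySem.Str.slice region (some (k : Int)) (some ((k : Int) + 6))
      = pasKmer region k from fun k => rfl]
  rw [PySem.List.foldl_append_if
    (p := fun k : Nat => PySem.Set.contains (PySem.Set.ofList pasMotifStrs) (pasKmer region k))
    (f := fun k : Nat => (st + (k : Int), pasKmer region k, c - (st + (k : Int))))]
  rw [List.nil_append]
  -- ===== B side =====
  rw [PySem.List.foldl_append_eq_flatMap, List.nil_append]
  have hB : pasMotifStrs.flatMap
      (fun m => (pasFindAll region m (((region.toList.length : Int)).toNat + 1) 0).map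
        (fun f => (st + f, m, c - (st + f))))
      = pasMotifStrs.flatMap
      (fun m => (pasOccs region.toList m.toList 0).map
        (fun k : Nat => (st + (k : Int), m, c - (st + (k : Int))))) := by
    apply List.flatMap_congr
    intro m hm
    have hm6 := pasMotif_len m hm
    have hmne : m.toList ≠ [] := by
      intro h; rw [h] at hm6; simp at hm6
    rw [Int.toNat_natCast,
      pasFindAll_eq region m hmne (region.toList.length + 1) 0 (Nat.zero_le _) (by omega), List.map_map]
    rfl
  rw [hB]
  -- ===== sorted =====
  refine (PySem.List.sorted_eq_of_perm_of_pairwise_lt _ _ _ ?_ ?_).symm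
  · -- Perm
    have hANodup : (((List.range (region.toList.length - 5)).filter
        (fun k : Nat => PySem.Set.contains (PySem.Set.ofList pasMotifStrs) (pasKmer region k))).map
        (fun k : Nat => (st + (k : Int), pasKmer region k, c - (st + (k : Int))))).Nodup := by
      apply List.Nodup.map_on
      · intro x hx y hy hxy
        have : st + (x : Int) = st + (y : Int) := congrArg (·.1) hxy
        omega
      · exact (List.nodup_range).filter _
    have hBNodup : (pasMotifStrs.flatMap
        (fun m => (pasOccs region.toList m.toList 0).map
          (fun k : Nat => (st + (k : Int), m, c - (st + (k : Int)))))).Nodup := by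
      rw [List.flatMap_def, List.nodup_flatten]
      constructor
      · intro l hl
        obtain ⟨m, hm, rfl⟩ := List.mem_map.mp hl
        apply List.Nodup.map_on
        · intro x hx y hy hxy
          have : st + (x : Int) = st + (y : Int) := congrArg (·.1) hxy
          omega
        · exact (List.nodup_range' 1).filter _
      · apply List.Pairwise.map _ ?_ (by decide : pasMotifStrs.Nodup)
        intro a b hab x hxa hxb
        obtain ⟨k, _, rfl⟩ := List.mem_map.mp hxa
        obtain ⟨k', _, he⟩ := List.mem_map.mp hxb
        exact hab (congrArg (fun t => t.2.1) he.symm)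
    rw [List.perm_ext_iff_of_nodup hANodup hBNodup]
    intro x
    constructor
    · intro hx
      obtain ⟨k, hk, rfl⟩ := List.mem_map.mp hx
      have hk' := List.mem_filter.mp hk
      have hkr := List.mem_range.mp hk'.1
      have hmem : pasKmer region k ∈ pasMotifStrs := by
        have := (PySem.Set.contains_iff _ _).mp hk'.2
        exact (PySem.Set.mem_ofList _ _).mp this
      apply List.mem_flatMap.mpr
      refine ⟨pasKmer region k, hmem, ?_⟩
      apply List.mem_map.mpr
      exact ⟨k, (pasKmer_motif_iff region _ (pasMotif_len _ hmem) k).mp ⟨hkr, rfl⟩, rfl⟩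
    · intro hx
      obtain ⟨m, hm, hx2⟩ := List.mem_flatMap.mp hx
      obtain ⟨k, hk, rfl⟩ := List.mem_map.mp hx2
      have hiff := (pasKmer_motif_iff region m (pasMotif_len m hm) k).mpr hk
      apply List.mem_map.mpr
      refine ⟨k, ?_, ?_⟩
      · apply List.mem_filter.mpr
        refine ⟨List.mem_range.mpr hiff.1, ?_⟩
        apply (PySem.Set.contains_iff _ _).mpr
        apply (PySem.Set.mem_ofList _ _).mpr
        rw [hiff.2]; exact hm
      · rw [hiff.2]
  · -- Pairwise lt on fst
    rw [List.pairwise_map]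
    apply List.Pairwise.imp ?_ ((List.pairwise_lt_range).filter _)
    intro a b hab
    simp only
    omega

-- ===== VERDICT (by name: the statement is the Claim_ definition above) =====
theorem pas_hits_spec : Claim_equal_pas_hits := by
  intro s c w _
  unfold Spec_pas_hits pas_hits pas_hits_alt
  exact pas_hits_spec_core _ _ _
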